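-- pv_equiv track=rewrite | github.com/Nicoderecho/modeloML | src/predecir.py | _codificar_cargo
-- ===== SOURCE A (Python) =====
-- def _codificar_cargo(cargo: str) -> int:
--     """Codifica el cargo del congresista a número."""
--     cargos_jerarquia = {
--         "leader": 5,
--         "speaker": 4,
--         "whip": 3,
--         "chair": 2,
--         "member": 1,
--         "": 0,
--     }
--     cargo_lower = cargo.lower()
--     for key, value in cargos_jerarquia.items():
--         if key in cargo_lower:
--             return value
--     return 0
-- ===== SOURCE B (Python) =====
-- def _codificar_cargo(cargo: str) -> int:
--     """Codifica el cargo del congresista a número."""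
--     cargos_jerarquia = {
--         "leader": 5,
--         "speaker": 4,
--         "whip": 3,
--         "chair": 2,
--         "member": 1,
--         "": 0,
--     }
--     cargo_lower = cargo.lower()
--     return max((v for k, v in cargos_jerarquia.items() if k in cargo_lower), default=0)
-- ===== Notes on version B (the rewrite author's own statement) =====
-- stated objective: alternative
-- what changed: Replaces the first-match early-return loop over the ordered mapping by an aggregation: the maximum rank over all matching keys (with default 0), which coincides because ranks are distinct and listed in descending order.
import Mathlib
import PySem

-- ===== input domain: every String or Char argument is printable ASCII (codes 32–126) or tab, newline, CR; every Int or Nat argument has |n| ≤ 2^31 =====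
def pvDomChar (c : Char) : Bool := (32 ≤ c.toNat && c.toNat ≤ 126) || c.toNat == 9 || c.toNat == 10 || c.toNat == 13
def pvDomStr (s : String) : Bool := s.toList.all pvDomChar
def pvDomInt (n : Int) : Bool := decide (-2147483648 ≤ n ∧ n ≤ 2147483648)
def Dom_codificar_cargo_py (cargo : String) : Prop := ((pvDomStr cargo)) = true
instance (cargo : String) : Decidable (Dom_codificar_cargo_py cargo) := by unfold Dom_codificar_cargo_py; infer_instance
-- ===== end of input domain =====

-- B computes the same rank as the maximum over all matching entries instead of first-match early return (alternative decomposition, same cost).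
-- ===== PORT A =====
-- loop 'for key, value in cargos_jerarquia.items(): if key in cargo_lower: return value' with early return, then 'return 0'
def codAFor (items : List (String × Int)) (cargo_lower : String) : Int :=
  match items with
  | [] => 0
  | (key, value) :: rest =>
      if PySem.Str.isIn key cargo_lower then value else codAFor rest cargo_lower

def codificar_cargo_py (cargo : String) : Int :=
  let cargos_jerarquia : PySem.Dict String Int :=
    PySem.Dict.ofList [("leader", 5), ("speaker", 4), ("whip", 3), ("chair", 2), ("member", 1), ("", 0)]
  let cargo_lower := PySem.Str.lower cargo
  codAFor cargos_jerarquia.items cargo_lower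

-- ===== PORT B =====
def codificar_cargo_py_alt (cargo : String) : Int :=
  let cargos_jerarquia : PySem.Dict String Int :=
    PySem.Dict.ofList [("leader", 5), ("speaker", 4), ("whip", 3), ("chair", 2), ("member", 1), ("", 0)]
  let cargo_lower := PySem.Str.lower cargo
  -- max(gen, default=0)
  (PySem.List.max? ((cargos_jerarquia.items.filter (fun p => PySem.Str.isIn p.1 cargo_lower)).map Prod.snd) (fun v => v)).getD 0

-- ===== PRECONDITION & SPEC =====
def Spec_codificar_cargo_py (cargo : String) (out : Int) : Prop := out = codificar_cargo_py_alt cargo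
instance (cargo : String) (out : Int) : Decidable (Spec_codificar_cargo_py cargo out) := by unfold Spec_codificar_cargo_py; infer_instance

-- ===== CLAIM (what is proved, stated in full; the proofs are below) =====
def Claim_equal_codificar_cargo_py : Prop := ∀ (cargo : String), Dom_codificar_cargo_py cargo → Spec_codificar_cargo_py cargo (codificar_cargo_py cargo)

-- ===== LEMMAS AND PROOFS =====

-- ===== VERDICT (by name: the statement is the Claim_ definition above) =====
theorem codificar_cargo_py_spec : Claim_equal_codificar_cargo_py := by
  intro cargo _
  unfold Spec_codificar_cargo_py codificar_cargo_py codificar_cargo_py_alt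
  have hi : (PySem.Dict.ofList [("leader", (5:Int)), ("speaker", 4), ("whip", 3), ("chair", 2), ("member", 1), ("", 0)]).items
      = [("leader", (5:Int)), ("speaker", 4), ("whip", 3), ("chair", 2), ("member", 1), ("", 0)] := by decide
  simp only [hi]
  by_cases h1 : PySem.Str.isIn "leader" (PySem.Str.lower cargo) = true <;>
  by_cases h2 : PySem.Str.isIn "speaker" (PySem.Str.lower cargo) = true <;>
  by_cases h3 : PySem.Str.isIn "whip" (PySem.Str.lower cargo) = true <;>
  by_cases h4 : PySem.Str.isIn "chair" (PySem.Str.lower cargo) = true <;>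
  by_cases h5 : PySem.Str.isIn "member" (PySem.Str.lower cargo) = true <;>
  (try simp at h1; try simp at h2; try simp at h3; try simp at h4; try simp at h5) <;>
  simp [codAFor, h1, h2, h3, h4, h5, PySem.Chars.isIn_nil, PySem.List.max?]
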